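-- pv_equiv track=rewrite | github.com/Mehboobiqbal-dev/Multi-Cloud-AI-Management-Agent | multi-cloud-agent/backend/fallback_responses.py | _extract_goal
-- ===== SOURCE A (Python) =====
-- def _extract_goal(prompt: str) -> str:
--     """Extract the main goal from the prompt."""
--     # Simple goal extraction - can be enhanced with more sophisticated NLP
--     lines = prompt.split('\n')
--     for line in lines:
--         if any(word in line.lower() for word in ['goal', 'objective', 'task', 'need', 'want']):
--             return line.strip()
--
--     # If no explicit goal found, use the first meaningful line
--     for line in lines:
--         if line.strip() and len(line.strip()) > 10:
--             return line.strip()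
--
--     return "Accomplish the specified task efficiently and effectively"
-- ===== SOURCE B (Python) =====
-- def _extract_goal(prompt: str) -> str:
--     """Extract the main goal from the prompt (single pass)."""
--     candidate = None
--     for line in prompt.split('\n'):
--         low = line.lower()
--         if any(word in low for word in ('goal', 'objective', 'task', 'need', 'want')):
--             return line.strip()
--         if candidate is None:
--             stripped = line.strip()
--             if len(stripped) > 10:
--                 candidate = stripped
--     return candidate if candidate is not None else "Accomplish the specified task efficiently and effectively"
-- ===== Notes on version B (the rewrite author's own statement) =====
-- stated objective: simpler
-- what changed: Replaces A's two sequential scans over the lines with one single pass that returns immediately on the first keyword line while remembering the first meaningful line as a candidate for the fallback.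
import Mathlib
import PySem

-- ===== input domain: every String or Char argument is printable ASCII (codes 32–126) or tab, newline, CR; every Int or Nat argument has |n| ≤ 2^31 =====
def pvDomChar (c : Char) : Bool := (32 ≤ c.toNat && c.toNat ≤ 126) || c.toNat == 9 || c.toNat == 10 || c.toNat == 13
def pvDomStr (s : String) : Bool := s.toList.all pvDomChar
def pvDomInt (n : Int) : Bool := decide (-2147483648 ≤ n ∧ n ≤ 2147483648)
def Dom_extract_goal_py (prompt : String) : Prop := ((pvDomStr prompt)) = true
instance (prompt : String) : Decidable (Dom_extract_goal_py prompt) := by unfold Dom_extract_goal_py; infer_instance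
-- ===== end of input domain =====

-- B merges A's two sequential scans into one single pass over the lines (simpler decomposition).

-- ===== PORT A =====
-- keyword list of A's `any(word in line.lower() for word in [...])`
def pvGoalWords : List String := ["goal", "objective", "task", "need", "want"]

def pvHasGoalWord (line : String) : Bool :=
  pvGoalWords.any (fun w => PySem.Str.isIn w (PySem.Str.lower line))

-- first for-loop of A: return line.strip() on the first keyword line
def pvScanKw : List String → Option String
  | [] => none
  | l :: ls => if pvHasGoalWord l then some (PySem.Str.strip l) else pvScanKw ls

-- second for-loop of A: first line whose strip is truthy (non-empty) and longer than 10
def pvScanMeaning : List String → Option String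
  | [] => none
  | l :: ls =>
      if PySem.Str.len (PySem.Str.strip l) ≠ 0 ∧ 10 < PySem.Str.len (PySem.Str.strip l) then
        some (PySem.Str.strip l)
      else pvScanMeaning ls

def extract_goal_py (prompt : String) : String :=
  let lines := (PySem.Str.split? prompt "\n").getD []   -- sep "\n" ≠ "", so split? is some
  match pvScanKw lines with
  | some s => s
  | none =>
    match pvScanMeaning lines with
    | some s => s
    | none => "Accomplish the specified task efficiently and effectively"

-- ===== PORT B =====
-- single pass: early return on keyword line, otherwise remember first long stripped line
def pvOnePass : List String → Option String → String
  | [], candidate => candidate.getD "Accomplish the specified task efficiently and effectively"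
  | l :: ls, candidate =>
      if pvGoalWords.any (fun w => PySem.Str.isIn w (PySem.Str.lower l)) then
        PySem.Str.strip l
      else
        match candidate with
        | some c => pvOnePass ls (some c)
        | none =>
            if 10 < PySem.Str.len (PySem.Str.strip l) then
              pvOnePass ls (some (PySem.Str.strip l))
            else pvOnePass ls none

def extract_goal_py_alt (prompt : String) : String :=
  pvOnePass ((PySem.Str.split? prompt "\n").getD []) none

-- ===== PRECONDITION & SPEC =====
def Spec_extract_goal_py (prompt : String) (out : String) : Prop := out = extract_goal_py_alt prompt
instance (prompt : String) (out : String) : Decidable (Spec_extract_goal_py prompt out) := by unfold Spec_extract_goal_py; infer_instance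

-- ===== CLAIM (what is proved, stated in full; the proofs are below) =====
def Claim_equal_extract_goal_py : Prop := ∀ (prompt : String), Dom_extract_goal_py prompt → Spec_extract_goal_py prompt (extract_goal_py prompt)

-- ===== LEMMAS AND PROOFS =====

-- loop invariant of the single pass: the kept candidate plays the role of A's second scan
theorem pvOnePass_eq (ls : List String) (cand : Option String) :
    pvOnePass ls cand =
      match pvScanKw ls with
      | some s => s
      | none =>
        match cand with
        | some c => c
        | none =>
          match pvScanMeaning ls with
          | some s => s
          | none => "Accomplish the specified task efficiently and effectively" := by
  induction ls generalizing cand with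
  | nil => cases cand <;> rfl
  | cons l ls ih =>
    by_cases hk : (pvGoalWords.any (fun w => PySem.Str.isIn w (PySem.Str.lower l))) = true
    · simp only [pvOnePass, pvScanKw, pvHasGoalWord]
      rw [if_pos hk, if_pos hk]
    · simp only [pvOnePass, pvScanKw, pvScanMeaning, pvHasGoalWord]
      rw [if_neg hk, if_neg hk]
      cases cand with
      | some c => exact ih (some c)
      | none =>
        show (if 10 < PySem.Str.len (PySem.Str.strip l) then
                pvOnePass ls (some (PySem.Str.strip l)) else pvOnePass ls none) = _
        by_cases hm : 10 < PySem.Str.len (PySem.Str.strip l)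
        · rw [if_pos hm, ih, if_pos ⟨by omega, hm⟩]
        · rw [if_neg hm, ih, if_neg (fun h => hm h.2)]
-- ===== VERDICT (by name: the statement is the Claim_ definition above) =====
theorem extract_goal_py_spec : Claim_equal_extract_goal_py := by
  intro prompt _
  unfold Spec_extract_goal_py extract_goal_py extract_goal_py_alt
  rw [pvOnePass_eq]
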